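-- pv_equiv track=rewrite | github.com/HourGlss/stardew_growth | sim/pipeline.py | _simulate_cask_batches
-- ===== SOURCE A (Python) =====
-- from typing import Optional, Sequence
--
-- def _allocate_from_inventory(
--     inventory: dict[str, int],
--     capacity: int,
--     priority: Sequence[str],
-- ) -> tuple[dict[str, int], dict[str, int]]:
--     """Allocate up to capacity items from inventory by priority."""
--     remaining = inventory.copy()
--     taken = {crop_id: 0 for crop_id in inventory}
--     capacity = max(0, capacity)
--     for crop_id in priority:
--         if capacity <= 0:
--             break
--         available = remaining.get(crop_id, 0)
--         if available <= 0:
--             continue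
--         take = min(available, capacity)
--         taken[crop_id] = take
--         remaining[crop_id] = available - take
--         capacity -= take
--     return taken, remaining
--
-- def _simulate_cask_batches(
--     daily_base_wine: dict[str, list[int]],
--     starting_base_wine: dict[str, int],
--     casks: int,
--     batch_days: Sequence[int],
--     priority: Sequence[str],
--     max_days: int,
-- ) -> tuple[dict[str, int], dict[str, int], list[int]]:
--     """Simulate batch cask fills and return (aged, remaining, batch_fills)."""
--     inventory = {crop_id: int(starting_base_wine.get(crop_id, 0)) for crop_id in daily_base_wine}
--     aged = {crop_id: 0 for crop_id in daily_base_wine}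
--     batch_days_set = set(batch_days)
--     batch_fills: list[int] = []
--
--     for day in range(max_days):
--         for crop_id, daily in daily_base_wine.items():
--             inventory[crop_id] += daily[day]
--         if day in batch_days_set and casks > 0:
--             capacity = casks
--             taken, inventory = _allocate_from_inventory(inventory, capacity, priority)
--             batch_fills.append(sum(taken.values()))
--             for crop_id, amount in taken.items():
--                 aged[crop_id] += amount
--
--     return aged, inventory, batch_fills
-- ===== SOURCE B (Python) =====
-- def _simulate_cask_batches(
--     daily_base_wine,
--     starting_base_wine,
--     casks,
--     batch_days,
--     priority,
--     max_days,
-- ):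
--     """Prefix-sum re-implementation: accumulate each crop's production once,
--     then process only the (sorted, deduplicated, in-range) batch days."""
--     prefix = {}
--     total = {}
--     for crop_id, daily in daily_base_wine.items():
--         acc = int(starting_base_wine.get(crop_id, 0))
--         row = []
--         for day in range(max_days):
--             acc += daily[day]
--             row.append(acc)
--         prefix[crop_id] = row
--         total[crop_id] = acc
--     days = sorted({d for d in batch_days if 0 <= d < max_days})
--     taken_so_far = {crop_id: 0 for crop_id in daily_base_wine}
--     aged = {crop_id: 0 for crop_id in daily_base_wine}
--     batch_fills = []
--     if casks > 0:
--         for day in days: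
--             capacity = casks
--             fill = 0
--             for crop_id in priority:
--                 if capacity <= 0:
--                     break
--                 row = prefix.get(crop_id)
--                 if row is None:
--                     continue
--                 available = row[day] - taken_so_far[crop_id]
--                 if available <= 0:
--                     continue
--                 take = min(available, capacity)
--                 taken_so_far[crop_id] += take
--                 aged[crop_id] += take
--                 capacity -= take
--                 fill += take
--             batch_fills.append(fill)
--     remaining = {crop_id: total[crop_id] - taken_so_far[crop_id] for crop_id in daily_base_wine}
--     return aged, remaining, batch_fills
-- ===== Notes on version B (the rewrite author's own statement) =====
-- stated objective: alternative
-- what changed: Replaces A's day-by-day simulation (per-day dict update for every crop with allocation interleaved) by one prefix-sum pass per crop followed by a loop over only the sorted distinct in-range batch days with a running taken_so_far per crop; the remaining inventory is closed-form (total minus taken).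
import Mathlib
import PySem

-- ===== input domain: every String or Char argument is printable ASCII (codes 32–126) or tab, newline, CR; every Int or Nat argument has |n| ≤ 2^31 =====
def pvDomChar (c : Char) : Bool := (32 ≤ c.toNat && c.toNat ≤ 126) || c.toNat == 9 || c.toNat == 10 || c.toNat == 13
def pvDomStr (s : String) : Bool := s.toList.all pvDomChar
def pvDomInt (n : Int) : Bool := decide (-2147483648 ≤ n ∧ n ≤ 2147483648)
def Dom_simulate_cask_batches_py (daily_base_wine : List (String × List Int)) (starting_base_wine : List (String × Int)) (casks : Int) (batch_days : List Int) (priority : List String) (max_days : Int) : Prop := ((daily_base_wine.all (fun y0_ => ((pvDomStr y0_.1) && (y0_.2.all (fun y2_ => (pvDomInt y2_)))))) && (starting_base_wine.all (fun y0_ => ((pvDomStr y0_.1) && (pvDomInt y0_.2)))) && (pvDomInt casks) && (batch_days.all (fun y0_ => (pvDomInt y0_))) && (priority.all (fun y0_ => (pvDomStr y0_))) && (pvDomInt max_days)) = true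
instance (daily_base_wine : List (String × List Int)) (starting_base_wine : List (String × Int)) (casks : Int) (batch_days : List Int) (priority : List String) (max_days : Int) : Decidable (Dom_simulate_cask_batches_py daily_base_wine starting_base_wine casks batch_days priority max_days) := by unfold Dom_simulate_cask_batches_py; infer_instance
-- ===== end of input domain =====

-- B replaces A's per-day dict-update sweep by one prefix-sum pass per crop plus a loop over only the
-- sorted distinct in-range batch days (objective: alternative decomposition).

-- ===== PORT A =====
-- the 'for crop_id in priority' loop of _allocate_from_inventory; 'break' = early return
def pvAllocLoopA (taken remaining : PySem.Dict String Int) (capacity : Int) :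
    List String → PySem.Dict String Int × PySem.Dict String Int
  | [] => (taken, remaining)
  | c :: rest =>
    if capacity ≤ 0 then (taken, remaining)
    else
      let available := remaining.getD c 0
      if available ≤ 0 then pvAllocLoopA taken remaining capacity rest
      else
        pvAllocLoopA (taken.insert c (min available capacity))
          (remaining.insert c (available - min available capacity))
          (capacity - min available capacity) rest

-- _allocate_from_inventory
def pvAllocateA (inventory : PySem.Dict String Int) (capacity : Int) (priority : List String) :
    PySem.Dict String Int × PySem.Dict String Int :=
  let taken := inventory.keys.foldl (fun d c => d.insert c 0) (PySem.Dict.mk [])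
  pvAllocLoopA taken inventory (max 0 capacity) priority

-- one iteration of 'for day in range(max_days)'; dict iteration over daily_base_wine is its pair list
-- (exact: the list encodes a Python dict, Pre_ requires distinct keys); daily[day] via pyGet? (in
-- range on every read under Pre_, so the .getD 0 default is never used there)
def pvDayStepA (daily_base_wine : List (String × List Int)) (bset : PySem.Set Int) (casks : Int)
    (priority : List String) (st : PySem.Dict String Int × PySem.Dict String Int × List Int)
    (day : Int) : PySem.Dict String Int × PySem.Dict String Int × List Int :=
  let inv := daily_base_wine.foldl
    (fun d p => d.insert p.1 (d.getD p.1 0 + (PySem.List.pyGet? p.2 day).getD 0)) st.1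
  if day ∈ bset ∧ 0 < casks then
    let tr := pvAllocateA inv casks priority
    (tr.2, tr.1.items.foldl (fun d p => d.insert p.1 (d.getD p.1 0 + p.2)) st.2.1,
      st.2.2 ++ [tr.1.values.sum])
  else (inv, st.2.1, st.2.2)

def simulate_cask_batches_py (daily_base_wine : List (String × List Int)) (starting_base_wine : List (String × Int)) (casks : Int) (batch_days : List Int) (priority : List String) (max_days : Int) : (List (String × Int)) × (List (String × Int)) × List Int :=
  let inventory := daily_base_wine.foldl
    (fun d p => d.insert p.1 (((PySem.Dict.mk starting_base_wine).get? p.1).getD 0)) (PySem.Dict.mk [])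
  let aged := daily_base_wine.foldl (fun d p => d.insert p.1 (0 : Int)) (PySem.Dict.mk [])
  let bset : PySem.Set Int := PySem.Set.ofList batch_days
  let res := (PySem.List.pyRange 0 max_days 1).foldl
    (pvDayStepA daily_base_wine bset casks priority) (inventory, aged, ([] : List Int))
  (res.2.1.items, res.1.items, res.2.2)

-- ===== PORT B =====
-- one crop's prefix row and total: 'acc += daily[day]; row.append(acc)'
def pvRowB (daily : List Int) (start : Int) (max_days : Int) : List Int × Int :=
  (PySem.List.pyRange 0 max_days 1).foldl
    (fun (st : List Int × Int) day =>
      (st.1 ++ [st.2 + (PySem.List.pyGet? daily day).getD 0],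
       st.2 + (PySem.List.pyGet? daily day).getD 0))
    ([], start)

-- B's 'for crop_id in priority' loop at one batch day; 'break' = early return
def pvAllocLoopB (prefixD : PySem.Dict String (List Int)) (day : Int)
    (tsf aged : PySem.Dict String Int) (capacity fill : Int) :
    List String → PySem.Dict String Int × PySem.Dict String Int × Int
  | [] => (tsf, aged, fill)
  | c :: rest =>
    if capacity ≤ 0 then (tsf, aged, fill)
    else
      match prefixD.get? c with
      | none => pvAllocLoopB prefixD day tsf aged capacity fill rest
      | some row =>
        let available := (PySem.List.pyGet? row day).getD 0 - tsf.getD c 0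
        if available ≤ 0 then pvAllocLoopB prefixD day tsf aged capacity fill rest
        else
          pvAllocLoopB prefixD day (tsf.insert c (tsf.getD c 0 + min available capacity))
            (aged.insert c (aged.getD c 0 + min available capacity))
            (capacity - min available capacity) (fill + min available capacity) rest

def simulate_cask_batches_py_alt (daily_base_wine : List (String × List Int)) (starting_base_wine : List (String × Int)) (casks : Int) (batch_days : List Int) (priority : List String) (max_days : Int) : (List (String × Int)) × (List (String × Int)) × List Int :=
  let pt := daily_base_wine.foldl
    (fun (st : PySem.Dict String (List Int) × PySem.Dict String Int) p =>
      let r := pvRowB p.2 (((PySem.Dict.mk starting_base_wine).get? p.1).getD 0) max_days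
      (st.1.insert p.1 r.1, st.2.insert p.1 r.2))
    (PySem.Dict.mk [], PySem.Dict.mk [])
  let days := PySem.List.sorted
    (PySem.Set.ofList (batch_days.filter (fun d => decide (0 ≤ d) && decide (d < max_days))))
    (fun x => x) false
  let tsf := daily_base_wine.foldl (fun d p => d.insert p.1 (0 : Int)) (PySem.Dict.mk [])
  let aged := daily_base_wine.foldl (fun d p => d.insert p.1 (0 : Int)) (PySem.Dict.mk [])
  let res :=
    if 0 < casks then
      days.foldl
        (fun (st : PySem.Dict String Int × PySem.Dict String Int × List Int) day =>
          let r := pvAllocLoopB pt.1 day st.1 st.2.1 casks 0 priority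
          (r.1, r.2.1, st.2.2 ++ [r.2.2]))
        (tsf, aged, ([] : List Int))
    else (tsf, aged, ([] : List Int))
  let remaining := daily_base_wine.foldl
    (fun d p => d.insert p.1 (pt.2.getD p.1 0 - res.1.getD p.1 0)) (PySem.Dict.mk [])
  (res.2.1.items, remaining.items, res.2.2)

-- ===== PRECONDITION & SPEC =====
-- Pre_ excludes (a) inputs on which A raises IndexError (a crop whose daily list is shorter than
-- max_days) and (b) association lists with duplicate keys, which do not encode any Python dict
-- input at all (a Python dict cannot contain them), so (b) excludes no Python-representable input.
def Pre_simulate_cask_batches_py (daily_base_wine : List (String × List Int)) (starting_base_wine : List (String × Int)) (casks : Int) (batch_days : List Int) (priority : List String) (max_days : Int) : Prop :=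
  (daily_base_wine.map Prod.fst).Nodup ∧ (starting_base_wine.map Prod.fst).Nodup ∧
    ∀ p ∈ daily_base_wine, max_days ≤ (p.2.length : Int)
instance (daily_base_wine : List (String × List Int)) (starting_base_wine : List (String × Int)) (casks : Int) (batch_days : List Int) (priority : List String) (max_days : Int) : Decidable (Pre_simulate_cask_batches_py daily_base_wine starting_base_wine casks batch_days priority max_days) := by unfold Pre_simulate_cask_batches_py; infer_instance

def pvWitness_simulate_cask_batches_py : (List (String × List Int)) × (List (String × Int)) × Int × List Int × List String × Int :=
  ([("a", [1, 2]), ("b", [3, 0])], [("a", 3)], 2, [1], ["b", "a"], 2)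

def Spec_simulate_cask_batches_py (daily_base_wine : List (String × List Int)) (starting_base_wine : List (String × Int)) (casks : Int) (batch_days : List Int) (priority : List String) (max_days : Int) (out : (List (String × Int)) × (List (String × Int)) × List Int) : Prop := out = simulate_cask_batches_py_alt daily_base_wine starting_base_wine casks batch_days priority max_days
instance (daily_base_wine : List (String × List Int)) (starting_base_wine : List (String × Int)) (casks : Int) (batch_days : List Int) (priority : List String) (max_days : Int) (out : (List (String × Int)) × (List (String × Int)) × List Int) : Decidable (Spec_simulate_cask_batches_py daily_base_wine starting_base_wine casks batch_days priority max_days out) := by unfold Spec_simulate_cask_batches_py; infer_instance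

-- ===== CLAIM (what is proved, stated in full; the proofs are below) =====
def Claim_equal_simulate_cask_batches_py : Prop := ∀ (daily_base_wine : List (String × List Int)) (starting_base_wine : List (String × Int)) (casks : Int) (batch_days : List Int) (priority : List String) (max_days : Int), Dom_simulate_cask_batches_py daily_base_wine starting_base_wine casks batch_days priority max_days → Pre_simulate_cask_batches_py daily_base_wine starting_base_wine casks batch_days priority max_days → Spec_simulate_cask_batches_py daily_base_wine starting_base_wine casks batch_days priority max_days (simulate_cask_batches_py daily_base_wine starting_base_wine casks batch_days priority max_days)

-- ===== LEMMAS AND PROOFS =====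

-- the value-function view: every Dict both programs maintain keeps exactly the keys of
-- daily_base_wine, in its order, so it is the key list mapped through a value function
def pvMkf (K : List (String × List Int)) (f : String → Int) : PySem.Dict String Int :=
  PySem.Dict.mk (K.map (fun p => (p.1, f p.1)))

def pvKeys (K : List (String × List Int)) : List String := K.map Prod.fst

def pvBase (sbw : List (String × Int)) (c : String) : Int :=
  ((PySem.Dict.mk sbw).get? c).getD 0

def pvDaily (K : List (String × List Int)) (c : String) : List Int :=
  ((PySem.Dict.mk K).get? c).getD []

def pvS (K : List (String × List Int)) (c : String) (n : Nat) : Int :=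
  ((pvDaily K c).take n).sum

-- B's batch-day loop body, named so the fold can be reasoned about
def pvStepB (prefixD : PySem.Dict String (List Int)) (casks : Int) (priority : List String)
    (st : PySem.Dict String Int × PySem.Dict String Int × List Int) (day : Int) :
    PySem.Dict String Int × PySem.Dict String Int × List Int :=
  let r := pvAllocLoopB prefixD day st.1 st.2.1 casks 0 priority
  (r.1, r.2.1, st.2.2 ++ [r.2.2])

theorem pvGet_mapped {γ β : Type} (K : List (String × γ)) (g : String × γ → β) (c : String) :
    (PySem.Dict.mk (K.map (fun p => (p.1, g p)))).get? c
      = (K.find? (fun p => p.1 == c)).map g := by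
  simp [PySem.Dict.get?, List.find?_map, Option.map_map, Function.comp_def]

theorem pvFind_not_mem {γ : Type} (K : List (String × γ)) (c : String)
    (hc : c ∉ K.map Prod.fst) : K.find? (fun q => q.1 == c) = none := by
  rw [List.find?_eq_none]
  intro q hq h
  exact hc (List.mem_map.mpr ⟨q, hq, by simpa using h⟩)

theorem pvFind_nodup {γ : Type} (K : List (String × γ)) (hnd : (K.map Prod.fst).Nodup)
    (p : String × γ) (hp : p ∈ K) : K.find? (fun q => q.1 == p.1) = some p := by
  induction K with
  | nil => cases hp
  | cons q rest ih =>
    rw [List.map_cons, List.nodup_cons] at hnd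
    rcases List.mem_cons.mp hp with rfl | hm
    · simp [List.find?]
    · have hne : (q.1 == p.1) = false := by
        refine beq_false_of_ne ?_
        intro e
        exact hnd.1 (e ▸ List.mem_map.mpr ⟨p, hm, rfl⟩)
      simp only [List.find?, hne]
      exact ih hnd.2 hm

theorem pvGetD_mkf (K : List (String × List Int)) (f : String → Int) (c : String) :
    (pvMkf K f).getD c 0 = if c ∈ pvKeys K then f c else 0 := by
  unfold pvMkf pvKeys
  rw [PySem.Dict.getD, pvGet_mapped]
  cases e : K.find? (fun q => q.1 == c) with
  | none =>
    have hnc : c ∉ K.map Prod.fst := by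
      intro hcm
      obtain ⟨p, hp, hpc⟩ := List.mem_map.mp hcm
      have := List.find?_eq_none.mp e p hp
      simp [hpc] at this
    simp [hnc]
  | some q =>
    have h1 : q.1 = c := by simpa using List.find?_some e
    have h2 : c ∈ K.map Prod.fst := List.mem_map.mpr ⟨q, List.mem_of_find?_eq_some e, h1⟩
    simp only [Option.map_some, Option.getD_some]
    rw [if_pos h2, h1]

theorem pvGet_mapped_nodup {γ β : Type} (K : List (String × γ)) (g : String × γ → β)
    (hnd : (K.map Prod.fst).Nodup) (p : String × γ) (hp : p ∈ K) :
    (PySem.Dict.mk (K.map (fun q => (q.1, g q)))).get? p.1 = some (g p) := by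
  rw [pvGet_mapped, pvFind_nodup K hnd p hp]; rfl

theorem pvInsert_mkf (K : List (String × List Int)) (f : String → Int) (c : String)
    (hc : c ∈ pvKeys K) (w : Int) :
    (pvMkf K f).insert c w = pvMkf K (Function.update f c w) := by
  unfold pvMkf pvKeys at *
  obtain ⟨p, hp, hpc⟩ := List.mem_map.mp hc
  have hcont : (PySem.Dict.mk (K.map (fun q => (q.1, f q.1)))).contains c = true := by
    simp only [PySem.Dict.contains, List.any_map, List.any_eq_true, Function.comp_def]
    exact ⟨p, hp, by simp [hpc]⟩
  simp only [PySem.Dict.insert, hcont, if_true]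
  apply congrArg PySem.Dict.mk
  rw [List.map_map]
  apply List.map_congr_left
  intro q hq
  by_cases hqc : q.1 = c
  · simp [Function.comp_def, hqc, Function.update]
  · simp [Function.comp_def, hqc, Function.update]

theorem pvAccumAux {γ : Type} (v : String × γ → Int) (f : String → Int)
    (todo : List (String × γ)) :
    ∀ (done : List (String × Int)),
      (todo.map Prod.fst).Nodup → (∀ p ∈ todo, p.1 ∉ done.map Prod.fst) →
      todo.foldl (fun d p => d.insert p.1 (d.getD p.1 0 + v p))
          (PySem.Dict.mk (done ++ todo.map (fun p => (p.1, f p.1))))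
        = PySem.Dict.mk (done ++ todo.map (fun p => (p.1, f p.1 + v p))) := by
  induction todo with
  | nil => intro done _ _; simp
  | cons p rest ih =>
    intro done hnd hdisj
    rw [List.map_cons, List.nodup_cons] at hnd
    have hpd : p.1 ∉ done.map Prod.fst := hdisj p (List.mem_cons_self)
    have hfind : (done ++ (p.1, f p.1) :: rest.map (fun q => (q.1, f q.1))).find?
        (fun q => q.1 == p.1) = some (p.1, f p.1) := by
      rw [List.find?_append, pvFind_not_mem done p.1 hpd]
      simp [List.find?]
    have hgd : (PySem.Dict.mk (done ++ (p.1, f p.1) :: rest.map (fun q => (q.1, f q.1)))).getD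
        p.1 0 = f p.1 := by
      simp [PySem.Dict.getD, PySem.Dict.get?, hfind]
    have hcont : (PySem.Dict.mk (done ++ (p.1, f p.1) :: rest.map (fun q => (q.1, f q.1)))).contains
        p.1 = true := by
      simp [PySem.Dict.contains]
    have hins : (PySem.Dict.mk (done ++ (p.1, f p.1) :: rest.map (fun q => (q.1, f q.1)))).insert
        p.1 (f p.1 + v p)
        = PySem.Dict.mk ((done ++ [(p.1, f p.1 + v p)]) ++ rest.map (fun q => (q.1, f q.1))) := by
      simp only [PySem.Dict.insert, hcont, if_true]
      apply congrArg PySem.Dict.mk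
      rw [List.map_append, List.map_cons]
      have hd : done.map (fun q => if q.1 == p.1 then (p.1, f p.1 + v p) else q) = done := by
        conv_rhs => rw [← List.map_id done]
        apply List.map_congr_left
        intro q hq
        have : (q.1 == p.1) = false := by
          refine beq_false_of_ne ?_
          intro e
          exact hpd (List.mem_map.mpr ⟨q, hq, e⟩)
        simp [this]
      have hr : (rest.map (fun q => (q.1, f q.1))).map
          (fun q => if q.1 == p.1 then (p.1, f p.1 + v p) else q)
          = rest.map (fun q => (q.1, f q.1)) := by
        rw [List.map_map]
        apply List.map_congr_left
        intro q hq
        have hne : q.1 ≠ p.1 := fun e => hnd.1 (List.mem_map.mpr ⟨q, hq, e⟩)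
        simp [Function.comp_def, hne]
      simp only [hd, hr]
      simp
    rw [List.map_cons, List.foldl_cons, hgd, hins,
      ih (done ++ [(p.1, f p.1 + v p)]) hnd.2 ?_]
    · simp
    · intro q hq hmem
      rw [List.map_append, List.mem_append] at hmem
      rcases hmem with h | h
      · exact hdisj q (List.mem_cons_of_mem _ hq) h
      · have hq1 : q.1 = p.1 := by simpa using h
        exact hnd.1 (List.mem_map.mpr ⟨q, hq, hq1⟩)

theorem pvAccum {γ : Type} (K : List (String × γ)) (v : String × γ → Int) (f : String → Int)
    (hnd : (K.map Prod.fst).Nodup) :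
    K.foldl (fun d p => d.insert p.1 (d.getD p.1 0 + v p))
        (PySem.Dict.mk (K.map (fun p => (p.1, f p.1))))
      = PySem.Dict.mk (K.map (fun p => (p.1, f p.1 + v p))) := by
  simpa using pvAccumAux v f K [] hnd (by simp)

theorem pvBuild {γ β : Type} (K : List (String × γ)) (g : String × γ → β)
    (hnd : (K.map Prod.fst).Nodup) :
    K.foldl (fun d p => d.insert p.1 (g p)) (PySem.Dict.mk [])
      = PySem.Dict.mk (K.map (fun p => (p.1, g p))) := by
  apply PySem.Dict.ext
  rw [PySem.Dict.items_foldl_insert_fresh K Prod.fst g (PySem.Dict.mk [])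
    (by intro a _; simp [PySem.Dict.contains]) hnd]
  simp

theorem pvBuildKeys (ks : List String) (hnd : ks.Nodup) :
    ks.foldl (fun d c => d.insert c (0 : Int)) (PySem.Dict.mk [])
      = PySem.Dict.mk (ks.map (fun c => (c, (0 : Int)))) := by
  apply PySem.Dict.ext
  rw [PySem.Dict.items_foldl_insert_fresh ks (fun c => c) (fun _ => (0 : Int)) (PySem.Dict.mk [])
    (by intro a _; simp [PySem.Dict.contains]) (by simpa using hnd)]
  simp

theorem pvSum_map_sub (ks : List String) (f g : String → Int) :
    (ks.map (fun c => f c - g c)).sum = (ks.map f).sum - (ks.map g).sum := by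
  induction ks with
  | nil => simp
  | cons c t ih => simp only [List.map_cons, List.sum_cons, ih]; ring

theorem pvSum_update (ks : List String) (hnd : ks.Nodup) (f : String → Int) (c : String)
    (hc : c ∈ ks) (w : Int) :
    (ks.map (Function.update f c w)).sum = (ks.map f).sum - f c + w := by
  induction ks with
  | nil => cases hc
  | cons a t ih =>
    rw [List.nodup_cons] at hnd
    rcases List.mem_cons.mp hc with rfl | hm
    · have ht : t.map (Function.update f c w) = t.map f := by
        apply List.map_congr_left
        intro x hx
        have : x ≠ c := fun e => hnd.1 (e ▸ hx)
        simp [Function.update, this]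
      simp only [List.map_cons, List.sum_cons, ht, Function.update, dif_pos]
      simp
      ring
    · have ha : a ≠ c := fun e => hnd.1 (e ▸ hm)
      simp only [List.map_cons, List.sum_cons, ih hnd.2 hm]
      have : Function.update f c w a = f a := by simp [Function.update, ha]
      rw [this]
      ring

-- the common abstract allocation recursion both priority loops follow
def pvSpec (keys : List String) (P : String → Int) :
    List String → (String → Int) → (String → Int) → (String → Int) → Int → Int →
      ((String → Int) × (String → Int) × (String → Int) × Int × Int)
  | [], t, tk, g, cap, fill => (t, tk, g, cap, fill)
  | c :: rest, t, tk, g, cap, fill =>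
    if cap ≤ 0 then (t, tk, g, cap, fill)
    else if c ∈ keys ∧ 0 < P c - t c then
      pvSpec keys P rest (Function.update t c (t c + min (P c - t c) cap))
        (Function.update tk c (min (P c - t c) cap))
        (Function.update g c (g c + min (P c - t c) cap))
        (cap - min (P c - t c) cap) (fill + min (P c - t c) cap)
    else pvSpec keys P rest t tk g cap fill

theorem pvLA (K : List (String × List Int)) (P : String → Int) (prio : List String) :
    ∀ (t tk g : String → Int) (cap fill : Int),
      pvAllocLoopA (pvMkf K tk) (pvMkf K (fun x => P x - t x)) cap prio
        = (pvMkf K (pvSpec (pvKeys K) P prio t tk g cap fill).2.1,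
           pvMkf K (fun x => P x - (pvSpec (pvKeys K) P prio t tk g cap fill).1 x)) := by
  induction prio with
  | nil => intro t tk g cap fill; rfl
  | cons c rest ih =>
    intro t tk g cap fill
    by_cases h0 : cap ≤ 0
    · simp [pvAllocLoopA, pvSpec, h0]
    · by_cases hc : c ∈ pvKeys K ∧ 0 < P c - t c
      · have hav : (pvMkf K (fun x => P x - t x)).getD c 0 = P c - t c := by
          rw [pvGetD_mkf]; simp [hc.1]
        have hne : ¬ (P c - t c ≤ 0) := by have := hc.2; omega
        simp only [pvAllocLoopA, pvSpec, if_neg h0, hav, if_neg hne, if_pos hc]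
        rw [pvInsert_mkf K tk c hc.1 _, pvInsert_mkf K (fun x => P x - t x) c hc.1 _]
        have harg : Function.update (fun x => P x - t x) c
              (P c - t c - min (P c - t c) cap)
            = (fun x => P x - Function.update t c (t c + min (P c - t c) cap) x) := by
          funext x
          by_cases hx : x = c
          · simp [Function.update, hx]; ring
          · simp [Function.update, hx]
        rw [harg]
        exact ih _ _ _ _ _
      · have hav : (pvMkf K (fun x => P x - t x)).getD c 0 ≤ 0 := by
          rw [pvGetD_mkf]
          by_cases hm : c ∈ pvKeys K
          · simp only [hm, if_true]
            push_neg at hc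
            have := hc hm
            omega
          · simp [hm]
        simp only [pvAllocLoopA, pvSpec, if_neg h0, if_pos hav, if_neg hc]
        exact ih _ _ _ _ _

theorem pvLB (K : List (String × List Int)) (P : String → Int) (day : Int)
    (prefixD : PySem.Dict String (List Int))
    (hsome : ∀ c ∈ pvKeys K, ∃ row, prefixD.get? c = some row ∧
      (PySem.List.pyGet? row day).getD 0 = P c)
    (hnone : ∀ c, c ∉ pvKeys K → prefixD.get? c = none)
    (prio : List String) :
    ∀ (t tk g : String → Int) (cap fill : Int),
      pvAllocLoopB prefixD day (pvMkf K t) (pvMkf K g) cap fill prio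
        = (pvMkf K (pvSpec (pvKeys K) P prio t tk g cap fill).1,
           pvMkf K (pvSpec (pvKeys K) P prio t tk g cap fill).2.2.1,
           (pvSpec (pvKeys K) P prio t tk g cap fill).2.2.2.2) := by
  induction prio with
  | nil => intro t tk g cap fill; rfl
  | cons c rest ih =>
    intro t tk g cap fill
    by_cases h0 : cap ≤ 0
    · simp [pvAllocLoopB, pvSpec, h0]
    · by_cases hm : c ∈ pvKeys K
      · obtain ⟨row, hrow, hval⟩ := hsome c hm
        have hgt : (pvMkf K t).getD c 0 = t c := by rw [pvGetD_mkf]; simp [hm]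
        have hgg : (pvMkf K g).getD c 0 = g c := by rw [pvGetD_mkf]; simp [hm]
        by_cases hpos : 0 < P c - t c
        · have hc : c ∈ pvKeys K ∧ 0 < P c - t c := ⟨hm, hpos⟩
          have hne : ¬ (P c - t c ≤ 0) := by omega
          simp only [pvAllocLoopB, pvSpec, if_neg h0, hrow, hgt, hgg, hval, if_neg hne,
            if_pos hc]
          rw [pvInsert_mkf K t c hm _, pvInsert_mkf K g c hm _]
          exact ih _ _ _ _ _
        · have hc : ¬ (c ∈ pvKeys K ∧ 0 < P c - t c) := fun h => hpos h.2
          have hle : P c - t c ≤ 0 := by omega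
          simp only [pvAllocLoopB, pvSpec, if_neg h0, hrow, hgt, hval, if_pos hle, if_neg hc]
          exact ih _ _ _ _ _
      · have hn := hnone c hm
        have hc : ¬ (c ∈ pvKeys K ∧ 0 < P c - t c) := fun h => hm h.1
        simp only [pvAllocLoopB, pvSpec, if_neg h0, hn, if_neg hc]
        exact ih _ _ _ _ _

theorem pvSpec_g (keys : List String) (P : String → Int) (prio : List String) :
    ∀ (t tk : String → Int) (cap fill : Int),
      (pvSpec keys P prio t tk t cap fill).2.2.1 = (pvSpec keys P prio t tk t cap fill).1 := by
  induction prio with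
  | nil => intro t tk cap fill; rfl
  | cons c rest ih =>
    intro t tk cap fill
    by_cases h0 : cap ≤ 0
    · simp [pvSpec, h0]
    · by_cases hc : c ∈ keys ∧ 0 < P c - t c
      · simp only [pvSpec, if_neg h0, if_pos hc]
        exact ih _ _ _ _
      · simp only [pvSpec, if_neg h0, if_neg hc]
        exact ih _ _ _ _

theorem pvSpec_once (keys : List String) (P : String → Int) (prio : List String) :
    ∀ (t tk g : String → Int) (cap fill : Int) (t0 : String → Int),
      (∀ x, t0 x ≤ t x) → (∀ x, tk x = t x - t0 x) →
      (∀ x, t0 x < t x → P x ≤ t x ∨ cap ≤ 0) →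
      ∀ x, (pvSpec keys P prio t tk g cap fill).2.1 x
            = (pvSpec keys P prio t tk g cap fill).1 x - t0 x := by
  induction prio with
  | nil => intro t tk g cap fill t0 _ h2 _ x; exact h2 x
  | cons c rest ih =>
    intro t tk g cap fill t0 h1 h2 h3 x
    by_cases h0 : cap ≤ 0
    · simp only [pvSpec, if_pos h0]
      exact h2 x
    · by_cases hc : c ∈ keys ∧ 0 < P c - t c
      · simp only [pvSpec, if_neg h0, if_pos hc]
        have htc : t c = t0 c := by
          by_contra hne
          have hlt : t0 c < t c := lt_of_le_of_ne (h1 c) (Ne.symm hne)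
          rcases h3 c hlt with h | h
          · have := hc.2; omega
          · exact h0 h
        have htake : 0 < min (P c - t c) cap := by
          have := hc.2
          rcases le_total (P c - t c) cap with hmm | hmm
          · rw [min_eq_left hmm]; omega
          · rw [min_eq_right hmm]; omega
        refine ih _ _ _ _ _ t0 ?_ ?_ ?_ x
        · intro y
          rw [Function.update_apply]
          split_ifs with hy
          · subst hy; linarith [h1 y]
          · exact h1 y
        · intro y
          rw [Function.update_apply, Function.update_apply]
          split_ifs with hy
          · subst hy; rw [htc]; ring
          · exact h2 y
        · intro y hy
          rw [Function.update_apply] at hy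
          rw [Function.update_apply]
          split_ifs with hyc
          · subst hyc
            rcases le_total (P y - t y) cap with hmm | hmm
            · left; rw [min_eq_left hmm]; linarith
            · right; rw [min_eq_right hmm]; linarith
          · rw [if_neg hyc] at hy
            rcases h3 y hy with h | h
            · exact Or.inl h
            · exact absurd h h0
      · simp only [pvSpec, if_neg h0, if_neg hc]
        exact ih _ _ _ _ _ t0 h1 h2 h3 x

theorem pvSpec_fill (keys : List String) (P : String → Int) (prio : List String)
    (hnd : keys.Nodup) :
    ∀ (t tk g : String → Int) (cap fill : Int),
      (pvSpec keys P prio t tk g cap fill).2.2.2.2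
        = fill + ((keys.map (pvSpec keys P prio t tk g cap fill).1).sum - (keys.map t).sum) := by
  induction prio with
  | nil => intro t tk g cap fill; simp [pvSpec]
  | cons c rest ih =>
    intro t tk g cap fill
    by_cases h0 : cap ≤ 0
    · simp [pvSpec, h0]
    · by_cases hc : c ∈ keys ∧ 0 < P c - t c
      · simp only [pvSpec, if_neg h0, if_pos hc]
        rw [ih]
        have hs : (keys.map (Function.update t c (t c + min (P c - t c) cap))).sum
            = (keys.map t).sum + min (P c - t c) cap := by
          rw [pvSum_update keys hnd t c hc.1]
          ring
        rw [hs]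
        ring
      · simp only [pvSpec, if_neg h0, if_neg hc]
        exact ih _ _ _ _ _

theorem pvPyGet_nat {α : Type} [Inhabited α] (xs : List α) (n : Nat) (h : n < xs.length)
    (d : α) : (PySem.List.pyGet? xs (n : Int)).getD d = xs[n] := by
  unfold PySem.List.pyGet? PySem.List.pyIdx?
  rw [if_pos (Int.natCast_nonneg n), if_pos (by exact_mod_cast h)]
  simp [List.getElem?_eq_getElem h]

theorem pvRange_toNat (m : Int) :
    PySem.List.pyRange 0 m = PySem.List.pyRange 0 (m.toNat : Int) := by
  rcases (show m ≤ 0 ∨ 0 < m by omega) with h | h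
  · rw [PySem.List.pyRange_one_eq_nil h, Int.toNat_of_nonpos h]
    exact (PySem.List.pyRange_one_eq_nil (by simp)).symm
  · rw [Int.toNat_of_nonneg h.le]

theorem pvRowB_toNat (daily : List Int) (b : Int) (m : Int) :
    pvRowB daily b m = pvRowB daily b (m.toNat : Int) := by
  unfold pvRowB
  rw [pvRange_toNat]

theorem pvRowB_spec (daily : List Int) (b : Int) (m : Nat) (hlen : m ≤ daily.length) :
    pvRowB daily b (m : Int)
      = ((List.range m).map (fun k => b + (daily.take (k + 1)).sum),
         b + (daily.take m).sum) := by
  induction m with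
  | zero => simp [pvRowB]
  | succ n ihn =>
    have hn : n ≤ daily.length := Nat.le_of_succ_le hlen
    have hcast : ((n + 1 : Nat) : Int) = (n : Int) + 1 := by push_cast; ring
    have hget : (PySem.List.pyGet? daily (n : Int)).getD 0 = daily[n]'(by omega) :=
      pvPyGet_nat daily n (by omega) 0
    unfold pvRowB at ihn ⊢
    rw [hcast, PySem.List.pyRange_one_succ_right (Int.natCast_nonneg n), List.foldl_append,
      ihn hn]
    simp only [List.foldl_cons, List.foldl_nil, hget]
    have hsum : (daily.take (n + 1)).sum = (daily.take n).sum + daily[n]'(by omega) := by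
      rw [List.take_succ, List.sum_append, List.getElem?_eq_getElem (by omega : n < daily.length)]
      simp
    rw [Prod.mk.injEq]
    refine ⟨?_, by rw [hsum]; ring⟩
    rw [List.range_succ, List.map_append, List.map_cons, List.map_nil]
    have hlast : b + (daily.take n).sum + daily[n]'(by omega) = b + (daily.take (n + 1)).sum := by
      rw [hsum]; ring
    rw [hlast]

theorem pvDays_eq (bdays : List Int) (maxd : Int) :
    PySem.List.sorted
        (PySem.Set.ofList (bdays.filter (fun d => decide (0 ≤ d) && decide (d < maxd))))
        (fun x => x) false
      = (PySem.List.pyRange 0 maxd 1).filter (fun d => decide (d ∈ bdays)) := by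
  apply PySem.List.sorted_eq_of_perm_of_pairwise_lt
  · rw [List.perm_ext_iff_of_nodup
      (List.Nodup.filter _ (PySem.List.nodup_pyRange_one 0 maxd))
      (PySem.Set.nodup_ofList _)]
    intro d
    simp only [List.mem_filter, PySem.List.mem_pyRange_one, PySem.Set.mem_ofList,
      decide_eq_true_eq, Bool.and_eq_true]
    tauto
  · exact List.Pairwise.filter _ (PySem.List.pairwise_lt_pyRange_one 0 maxd)

theorem pvKeys_mkf (K : List (String × List Int)) (f : String → Int) :
    (pvMkf K f).keys = K.map Prod.fst := by
  simp [pvMkf, PySem.Dict.keys, List.map_map, Function.comp_def]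

-- the central simulation invariant: after n days, A's day loop and B's batch-day loop agree
theorem pvMainPos (K : List (String × List Int)) (sbw : List (String × Int)) (casks : Int)
    (bdays : List Int) (prio : List String) (maxd : Int)
    (hnd : (K.map Prod.fst).Nodup) (hcask : 0 < casks)
    (hlen : ∀ p ∈ K, maxd ≤ (p.2.length : Int)) :
    ∀ n : Nat, n ≤ maxd.toNat →
      ∃ (t : String → Int) (fills : List Int),
        (PySem.List.pyRange 0 (n : Int) 1).foldl
            (pvDayStepA K (PySem.Set.ofList bdays) casks prio)
            (pvMkf K (pvBase sbw), pvMkf K (fun _ => 0), [])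
          = (pvMkf K (fun c => pvBase sbw c + pvS K c n - t c), pvMkf K t, fills)
        ∧ ((PySem.List.pyRange 0 (n : Int) 1).filter (fun d => decide (d ∈ bdays))).foldl
            (pvStepB (PySem.Dict.mk
              (K.map (fun p => (p.1, (pvRowB p.2 (pvBase sbw p.1) maxd).1)))) casks prio)
            (pvMkf K (fun _ => 0), pvMkf K (fun _ => 0), [])
          = (pvMkf K t, pvMkf K t, fills) := by
  intro n
  induction n with
  | zero =>
    intro _
    refine ⟨fun _ => 0, [], ?_, ?_⟩
    · have h0 : PySem.List.pyRange 0 ((0 : Nat) : Int) 1 = [] :=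
        PySem.List.pyRange_one_eq_nil (by simp)
      rw [h0]
      simp only [List.foldl_nil]
      refine congrArg (fun d => (d, pvMkf K (fun _ => 0), ([] : List Int))) ?_
      unfold pvMkf
      apply congrArg
      apply List.map_congr_left
      intro p _
      simp [pvS]
    · have h0 : PySem.List.pyRange 0 ((0 : Nat) : Int) 1 = [] :=
        PySem.List.pyRange_one_eq_nil (by simp)
      rw [h0]
      rfl
  | succ n ih =>
    intro hn1
    obtain ⟨t, fills, hA, hB⟩ := ih (by omega)
    have hnm : (n : Int) < maxd := by
      have : (n : Int) < (maxd.toNat : Int) := by exact_mod_cast hn1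
      rcases (show maxd ≤ 0 ∨ 0 < maxd by omega) with h | h
      · rw [Int.toNat_of_nonpos h] at this; omega
      · rwa [Int.toNat_of_nonneg h.le] at this
    have hcast : ((n + 1 : Nat) : Int) = (n : Int) + 1 := by push_cast; ring
    have hrange : PySem.List.pyRange 0 ((n + 1 : Nat) : Int) 1
        = PySem.List.pyRange 0 (n : Int) 1 ++ [(n : Int)] := by
      rw [hcast, PySem.List.pyRange_one_succ_right (Int.natCast_nonneg n)]
    -- the accumulate phase of day n
    have hlenn : ∀ p ∈ K, n < p.2.length := by
      intro p hp
      have := hlen p hp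
      omega
    have haccum : K.foldl
        (fun d p => d.insert p.1 (d.getD p.1 0 + (PySem.List.pyGet? p.2 (n : Int)).getD 0))
        (pvMkf K (fun c => pvBase sbw c + pvS K c n - t c))
        = pvMkf K (fun c => pvBase sbw c + pvS K c (n + 1) - t c) := by
      rw [show pvMkf K (fun c => pvBase sbw c + pvS K c n - t c)
          = PySem.Dict.mk (K.map (fun p => (p.1, (fun c => pvBase sbw c + pvS K c n - t c) p.1)))
          from rfl]
      rw [pvAccum K (fun p => (PySem.List.pyGet? p.2 (n : Int)).getD 0)
        (fun c => pvBase sbw c + pvS K c n - t c) hnd]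
      unfold pvMkf
      apply congrArg
      apply List.map_congr_left
      intro p hp
      have hdp : pvDaily K p.1 = p.2 := by
        unfold pvDaily
        rw [PySem.Dict.get?, pvFind_nodup K hnd p hp]
        rfl
      have hget : (PySem.List.pyGet? p.2 (n : Int)).getD 0 = p.2[n]'(hlenn p hp) :=
        pvPyGet_nat p.2 n (hlenn p hp) 0
      have hS : pvS K p.1 (n + 1) = pvS K p.1 n + p.2[n]'(hlenn p hp) := by
        unfold pvS
        rw [hdp, List.take_succ, List.sum_append,
          List.getElem?_eq_getElem (hlenn p hp)]
        simp
      simp only [hget, hS]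
      refine congrArg (fun z => (p.1, z)) ?_
      ring
    by_cases hb : (n : Int) ∈ bdays
    · -- batch day
      have hbset : ((n : Int) ∈ PySem.Set.ofList bdays ∧ 0 < casks) := by
        constructor
        · exact (PySem.Set.mem_ofList bdays _).mpr hb
        · exact hcask
      set P : String → Int := fun c => pvBase sbw c + pvS K c (n + 1) with hP
      set E := pvSpec (pvKeys K) P prio t (fun _ => 0) t casks 0 with hE
      -- A's step
      have hstepA : pvDayStepA K (PySem.Set.ofList bdays) casks prio
          (pvMkf K (fun c => pvBase sbw c + pvS K c n - t c), pvMkf K t, fills) (n : Int)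
          = (pvMkf K (fun x => P x - E.1 x), pvMkf K E.1, fills ++ [E.2.2.2.2]) := by
        unfold pvDayStepA
        simp only [haccum, if_pos hbset]
        -- allocate
        have htaken0 : (pvMkf K (fun c => pvBase sbw c + pvS K c (n + 1) - t c)).keys.foldl
            (fun d c => d.insert c (0 : Int)) (PySem.Dict.mk [])
            = pvMkf K (fun _ => 0) := by
          rw [pvKeys_mkf, pvBuildKeys (K.map Prod.fst) hnd]
          unfold pvMkf
          rw [List.map_map]
          rfl
        have hmax : max 0 casks = casks := max_eq_right hcask.le
        have halloc : pvAllocateA (pvMkf K (fun c => pvBase sbw c + pvS K c (n + 1) - t c))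
            casks prio = (pvMkf K E.2.1, pvMkf K (fun x => P x - E.1 x)) := by
          unfold pvAllocateA
          rw [htaken0, hmax]
          rw [show pvMkf K (fun c => pvBase sbw c + pvS K c (n + 1) - t c)
              = pvMkf K (fun x => P x - t x) from rfl]
          exact pvLA K P prio t (fun _ => 0) t casks 0
        rw [halloc]
        -- aged merge
        have hmerge : (pvMkf K E.2.1).items.foldl
            (fun d p => d.insert p.1 (d.getD p.1 0 + p.2)) (pvMkf K t)
            = pvMkf K E.1 := by
          have hitems : (pvMkf K E.2.1).items = K.map (fun p => (p.1, E.2.1 p.1)) := rfl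
          rw [hitems]
          have hinit : pvMkf K t
              = PySem.Dict.mk ((K.map (fun p => (p.1, E.2.1 p.1))).map
                  (fun q => (q.1, t q.1))) := by
            unfold pvMkf
            rw [List.map_map]
            rfl
          rw [hinit, pvAccum (K.map (fun p => (p.1, E.2.1 p.1))) (fun q => q.2) t
            (by rw [List.map_map]; exact hnd)]
          unfold pvMkf
          apply congrArg
          rw [List.map_map]
          apply List.map_congr_left
          intro p hp
          have honce : E.2.1 p.1 = E.1 p.1 - t p.1 := by
            rw [hE]
            exact pvSpec_once (pvKeys K) P prio t (fun _ => 0) t casks 0 t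
              (fun x => le_refl (t x)) (fun x => by ring) (fun x hx => absurd hx (lt_irrefl _)) p.1
          simp only [Function.comp_def, honce]
          refine congrArg (fun z => (p.1, z)) ?_
          ring
        rw [hmerge]
        -- the appended fill value
        have hvals : (pvMkf K E.2.1).values.sum = E.2.2.2.2 := by
          have h1 : (pvMkf K E.2.1).values = (K.map Prod.fst).map E.2.1 := by
            simp [pvMkf, PySem.Dict.values, List.map_map, Function.comp_def]
          rw [h1]
          have h2 : (K.map Prod.fst).map E.2.1
              = (K.map Prod.fst).map (fun c => E.1 c - t c) := by
            apply List.map_congr_left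
            intro c _
            rw [hE]
            exact pvSpec_once (pvKeys K) P prio t (fun _ => 0) t casks 0 t
              (fun x => le_refl (t x)) (fun x => by ring) (fun x hx => absurd hx (lt_irrefl _)) c
          rw [h2, pvSum_map_sub]
          rw [hE, pvSpec_fill (pvKeys K) P prio hnd t (fun _ => 0) t casks 0]
          unfold pvKeys
          ring
        rw [hvals]
      -- B's step
      have hsome : ∀ c ∈ pvKeys K, ∃ row,
          (PySem.Dict.mk (K.map (fun p => (p.1, (pvRowB p.2 (pvBase sbw p.1) maxd).1)))).get? c
            = some row ∧ (PySem.List.pyGet? row (n : Int)).getD 0 = P c := by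
        intro c hcm
        obtain ⟨p, hp, rfl⟩ := List.mem_map.mp hcm
        refine ⟨(pvRowB p.2 (pvBase sbw p.1) maxd).1, ?_, ?_⟩
        · exact pvGet_mapped_nodup K (fun q => (pvRowB q.2 (pvBase sbw q.1) maxd).1) hnd p hp
        · have hlenp : maxd.toNat ≤ p.2.length := by
            have := hlen p hp
            omega
          rw [pvRowB_toNat, pvRowB_spec p.2 (pvBase sbw p.1) maxd.toNat hlenp]
          have hrowlen : ((List.range maxd.toNat).map
              (fun k => pvBase sbw p.1 + (p.2.take (k + 1)).sum)).length = maxd.toNat := by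
            simp
          have hnlt : n < maxd.toNat := by omega
          rw [pvPyGet_nat _ n (by rw [hrowlen]; exact hnlt) 0]
          rw [List.getElem_map, List.getElem_range]
          have hdp : pvDaily K p.1 = p.2 := by
            unfold pvDaily
            rw [PySem.Dict.get?, pvFind_nodup K hnd p hp]
            rfl
          show pvBase sbw p.1 + (p.2.take (n + 1)).sum
              = pvBase sbw p.1 + ((pvDaily K p.1).take (n + 1)).sum
          rw [hdp]
      have hnone : ∀ c, c ∉ pvKeys K →
          (PySem.Dict.mk (K.map (fun p => (p.1, (pvRowB p.2 (pvBase sbw p.1) maxd).1)))).get? c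
            = none := by
        intro c hcm
        rw [pvGet_mapped, pvFind_not_mem K c hcm]
        rfl
      have hstepB : pvStepB
          (PySem.Dict.mk (K.map (fun p => (p.1, (pvRowB p.2 (pvBase sbw p.1) maxd).1))))
          casks prio (pvMkf K t, pvMkf K t, fills) (n : Int)
          = (pvMkf K E.1, pvMkf K E.1, fills ++ [E.2.2.2.2]) := by
        unfold pvStepB
        rw [pvLB K P (n : Int) _ hsome hnone prio t (fun _ => 0) t casks 0]
        rw [hE]
        rw [pvSpec_g (pvKeys K) P prio t (fun _ => 0) casks 0]
      refine ⟨E.1, fills ++ [E.2.2.2.2], ?_, ?_⟩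
      · rw [hrange, List.foldl_append, hA]
        simp only [List.foldl_cons, List.foldl_nil]
        exact hstepA
      · rw [hrange, List.filter_append, List.foldl_append, hB]
        have : ([(n : Int)].filter (fun d => decide (d ∈ bdays))) = [(n : Int)] := by
          simp [hb]
        rw [this]
        simp only [List.foldl_cons, List.foldl_nil]
        exact hstepB
    · -- not a batch day
      have hbset : ¬ ((n : Int) ∈ PySem.Set.ofList bdays ∧ 0 < casks) := by
        intro h
        exact hb ((PySem.Set.mem_ofList bdays _).mp h.1)
      refine ⟨t, fills, ?_, ?_⟩
      · rw [hrange, List.foldl_append, hA]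
        simp only [List.foldl_cons, List.foldl_nil]
        unfold pvDayStepA
        simp only [haccum, if_neg hbset]
      · rw [hrange, List.filter_append, List.foldl_append, hB]
        have : ([(n : Int)].filter (fun d => decide (d ∈ bdays))) = [] := by
          simp [hb]
        rw [this]
        rfl

-- A with no casks: the day loop only accumulates
theorem pvMainNeg (K : List (String × List Int)) (sbw : List (String × Int)) (casks : Int)
    (bdays : List Int) (prio : List String)
    (hnd : (K.map Prod.fst).Nodup) (hcask : ¬ 0 < casks) :
    ∀ n : Nat, (∀ p ∈ K, n ≤ p.2.length) →
      (PySem.List.pyRange 0 (n : Int) 1).foldl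
          (pvDayStepA K (PySem.Set.ofList bdays) casks prio)
          (pvMkf K (pvBase sbw), pvMkf K (fun _ => 0), [])
        = (pvMkf K (fun c => pvBase sbw c + pvS K c n), pvMkf K (fun _ => 0), []) := by
  intro n
  induction n with
  | zero =>
    intro _
    have h0 : PySem.List.pyRange 0 ((0 : Nat) : Int) 1 = [] :=
      PySem.List.pyRange_one_eq_nil (by simp)
    rw [h0]
    simp only [List.foldl_nil]
    refine congrArg (fun d => (d, pvMkf K (fun _ => 0), ([] : List Int))) ?_
    unfold pvMkf
    apply congrArg
    apply List.map_congr_left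
    intro p _
    simp [pvS]
  | succ n ih =>
    intro hlenn
    have hcast : ((n + 1 : Nat) : Int) = (n : Int) + 1 := by push_cast; ring
    have hrange : PySem.List.pyRange 0 ((n + 1 : Nat) : Int) 1
        = PySem.List.pyRange 0 (n : Int) 1 ++ [(n : Int)] := by
      rw [hcast, PySem.List.pyRange_one_succ_right (Int.natCast_nonneg n)]
    rw [hrange, List.foldl_append, ih (fun p hp => by have := hlenn p hp; omega)]
    simp only [List.foldl_cons, List.foldl_nil]
    unfold pvDayStepA
    have hbset : ¬ ((n : Int) ∈ PySem.Set.ofList bdays ∧ 0 < casks) := fun h => hcask h.2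
    have hlt : ∀ p ∈ K, n < p.2.length := fun p hp => by have := hlenn p hp; omega
    have haccum : K.foldl
        (fun d p => d.insert p.1 (d.getD p.1 0 + (PySem.List.pyGet? p.2 (n : Int)).getD 0))
        (pvMkf K (fun c => pvBase sbw c + pvS K c n))
        = pvMkf K (fun c => pvBase sbw c + pvS K c (n + 1)) := by
      rw [show pvMkf K (fun c => pvBase sbw c + pvS K c n)
          = PySem.Dict.mk (K.map (fun p => (p.1, (fun c => pvBase sbw c + pvS K c n) p.1)))
          from rfl]
      rw [pvAccum K (fun p => (PySem.List.pyGet? p.2 (n : Int)).getD 0)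
        (fun c => pvBase sbw c + pvS K c n) hnd]
      unfold pvMkf
      apply congrArg
      apply List.map_congr_left
      intro p hp
      have hdp : pvDaily K p.1 = p.2 := by
        unfold pvDaily
        rw [PySem.Dict.get?, pvFind_nodup K hnd p hp]
        rfl
      have hget : (PySem.List.pyGet? p.2 (n : Int)).getD 0 = p.2[n]'(hlt p hp) :=
        pvPyGet_nat p.2 n (hlt p hp) 0
      have hS : pvS K p.1 (n + 1) = pvS K p.1 n + p.2[n]'(hlt p hp) := by
        unfold pvS
        rw [hdp, List.take_succ, List.sum_append, List.getElem?_eq_getElem (hlt p hp)]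
        simp
      simp only [hget, hS]
      refine congrArg (fun z => (p.1, z)) ?_
      ring
    simp only [haccum, if_neg hbset]

-- ===== VERDICT (by name: the statement is the Claim_ definition above) =====
theorem simulate_cask_batches_py_spec : Claim_equal_simulate_cask_batches_py := by
  intro dbw sbw casks bdays prio maxd _ hpre
  obtain ⟨hnd, _, hlen⟩ := hpre
  unfold Spec_simulate_cask_batches_py
  simp only [simulate_cask_batches_py, simulate_cask_batches_py_alt]
  have hInv : dbw.foldl (fun d p => d.insert p.1 (((PySem.Dict.mk sbw).get? p.1).getD 0))
      (PySem.Dict.mk []) = pvMkf dbw (pvBase sbw) := pvBuild dbw _ hnd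
  have hZero : dbw.foldl (fun d p => d.insert p.1 (0 : Int)) (PySem.Dict.mk [])
      = pvMkf dbw (fun _ => 0) := pvBuild dbw _ hnd
  rw [hInv, hZero]
  rw [PySem.List.foldl_prod_mk
      (f := fun (d : PySem.Dict String (List Int)) (p : String × List Int) =>
        d.insert p.1 (pvRowB p.2 (((PySem.Dict.mk sbw).get? p.1).getD 0) maxd).1)
      (g := fun (d : PySem.Dict String Int) (p : String × List Int) =>
        d.insert p.1 (pvRowB p.2 (((PySem.Dict.mk sbw).get? p.1).getD 0) maxd).2)]
  have hRowD : dbw.foldl (fun (d : PySem.Dict String (List Int)) (p : String × List Int) =>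
      d.insert p.1 (pvRowB p.2 (((PySem.Dict.mk sbw).get? p.1).getD 0) maxd).1) (PySem.Dict.mk [])
      = PySem.Dict.mk (dbw.map (fun p => (p.1, (pvRowB p.2 (pvBase sbw p.1) maxd).1))) :=
    pvBuild dbw _ hnd
  have hTotD : dbw.foldl (fun (d : PySem.Dict String Int) (p : String × List Int) =>
      d.insert p.1 (pvRowB p.2 (((PySem.Dict.mk sbw).get? p.1).getD 0) maxd).2) (PySem.Dict.mk [])
      = PySem.Dict.mk (dbw.map (fun p => (p.1, (pvRowB p.2 (pvBase sbw p.1) maxd).2))) :=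
    pvBuild dbw _ hnd
  rw [hRowD, hTotD, pvDays_eq, pvRange_toNat maxd]
  have hTotGet : ∀ p ∈ dbw,
      (PySem.Dict.mk (dbw.map (fun q => (q.1, (pvRowB q.2 (pvBase sbw q.1) maxd).2)))).getD p.1 0
        = pvBase sbw p.1 + pvS dbw p.1 maxd.toNat := by
    intro p hp
    rw [PySem.Dict.getD,
      pvGet_mapped_nodup dbw (fun q => (pvRowB q.2 (pvBase sbw q.1) maxd).2) hnd p hp]
    have hlenp : maxd.toNat ≤ p.2.length := by
      have := hlen p hp
      omega
    rw [Option.getD_some, pvRowB_toNat, pvRowB_spec p.2 (pvBase sbw p.1) maxd.toNat hlenp]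
    have hdp : pvDaily dbw p.1 = p.2 := by
      unfold pvDaily
      rw [PySem.Dict.get?, pvFind_nodup dbw hnd p hp]
      rfl
    show pvBase sbw p.1 + (p.2.take maxd.toNat).sum
        = pvBase sbw p.1 + ((pvDaily dbw p.1).take maxd.toNat).sum
    rw [hdp]
  by_cases hcask : 0 < casks
  · obtain ⟨t, fills, hA, hB⟩ := pvMainPos dbw sbw casks bdays prio maxd hnd hcask hlen
      maxd.toNat le_rfl
    rw [if_pos hcask]
    rw [show (fun (st : PySem.Dict String Int × PySem.Dict String Int × List Int) (day : Int) =>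
          ((pvAllocLoopB (PySem.Dict.mk (dbw.map
              (fun p => (p.1, (pvRowB p.2 (pvBase sbw p.1) maxd).1)))) day st.1 st.2.1
              casks 0 prio).1,
           (pvAllocLoopB (PySem.Dict.mk (dbw.map
              (fun p => (p.1, (pvRowB p.2 (pvBase sbw p.1) maxd).1)))) day st.1 st.2.1
              casks 0 prio).2.1,
           st.2.2 ++ [(pvAllocLoopB (PySem.Dict.mk (dbw.map
              (fun p => (p.1, (pvRowB p.2 (pvBase sbw p.1) maxd).1)))) day st.1 st.2.1
              casks 0 prio).2.2]))
        = pvStepB (PySem.Dict.mk (dbw.map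
            (fun p => (p.1, (pvRowB p.2 (pvBase sbw p.1) maxd).1)))) casks prio from rfl]
    rw [hA, hB]
    have hRem : dbw.foldl (fun d p => d.insert p.1
        ((PySem.Dict.mk (dbw.map (fun q => (q.1, (pvRowB q.2 (pvBase sbw q.1) maxd).2)))).getD
            p.1 0
          - (pvMkf dbw t).getD p.1 0)) (PySem.Dict.mk [])
        = pvMkf dbw (fun c => pvBase sbw c + pvS dbw c maxd.toNat - t c) := by
      rw [pvBuild dbw (fun p =>
        (PySem.Dict.mk (dbw.map (fun q => (q.1, (pvRowB q.2 (pvBase sbw q.1) maxd).2)))).getD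
            p.1 0
          - (pvMkf dbw t).getD p.1 0) hnd]
      apply PySem.Dict.ext
      show dbw.map (fun p => (p.1,
          (PySem.Dict.mk (dbw.map (fun q => (q.1, (pvRowB q.2 (pvBase sbw q.1) maxd).2)))).getD
              p.1 0
            - (pvMkf dbw t).getD p.1 0))
        = dbw.map (fun p => (p.1, pvBase sbw p.1 + pvS dbw p.1 maxd.toNat - t p.1))
      apply List.map_congr_left
      intro p hp
      have h2 : (pvMkf dbw t).getD p.1 0 = t p.1 := by
        rw [pvGetD_mkf]
        rw [if_pos (show p.1 ∈ pvKeys dbw from List.mem_map.mpr ⟨p, hp, rfl⟩)]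
      rw [hTotGet p hp, h2]
    rw [hRem]
  · have hlenN : ∀ p ∈ dbw, maxd.toNat ≤ p.2.length := by
      intro p hp
      have := hlen p hp
      omega
    rw [if_neg hcask, pvMainNeg dbw sbw casks bdays prio hnd hcask maxd.toNat hlenN]
    have hRem : dbw.foldl (fun d p => d.insert p.1
        ((PySem.Dict.mk (dbw.map (fun q => (q.1, (pvRowB q.2 (pvBase sbw q.1) maxd).2)))).getD
            p.1 0
          - (pvMkf dbw (fun _ => 0)).getD p.1 0)) (PySem.Dict.mk [])
        = pvMkf dbw (fun c => pvBase sbw c + pvS dbw c maxd.toNat) := by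
      rw [pvBuild dbw (fun p =>
        (PySem.Dict.mk (dbw.map (fun q => (q.1, (pvRowB q.2 (pvBase sbw q.1) maxd).2)))).getD
            p.1 0
          - (pvMkf dbw (fun _ => 0)).getD p.1 0) hnd]
      apply PySem.Dict.ext
      show dbw.map (fun p => (p.1,
          (PySem.Dict.mk (dbw.map (fun q => (q.1, (pvRowB q.2 (pvBase sbw q.1) maxd).2)))).getD
              p.1 0
            - (pvMkf dbw (fun _ => 0)).getD p.1 0))
        = dbw.map (fun p => (p.1, pvBase sbw p.1 + pvS dbw p.1 maxd.toNat))
      apply List.map_congr_left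
      intro p hp
      have h2 : (pvMkf dbw (fun _ => (0 : Int))).getD p.1 0 = 0 := by
        rw [pvGetD_mkf]
        rw [if_pos (show p.1 ∈ pvKeys dbw from List.mem_map.mpr ⟨p, hp, rfl⟩)]
      rw [hTotGet p hp, h2]
      refine congrArg (fun z => (p.1, z)) ?_
      ring
    rw [hRem]
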